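-- pv_equiv track=rewrite | github.com/tanyagupta1/Rummy | RUMMY7.py | findcons
-- ===== SOURCE A (Python) =====
-- def findcons(l):
--     """ finds the largest >=3 consecutive set and returns it or returns the initial list """
--     k=[l[0]]
--     f=[]
--     l2=l[:]
--     for i in range(len(l)-1):
--
--         if l[i]+1==l[i+1]:
--             #k.append(l[i])
--             k.append(l[i+1])
--         else:
--             if len(k)<3:
--                 k=[l[i+1]]
--             else:
--                 if len(k)!=0:
--
--                     f.append(k)
--                     k=[l[i+1]]
--     if len(k)>2:
--         f.append(k)
--     if len(f)!=0 :
--         maxi=f[0]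
--         for i in range(1,len(f)):
--             maxi+=f[i]
--         for j in range(len(l2)):
--             if l2[j] not in maxi:
--                 maxi.append(l2[j])
--     else:
--
--
--         maxi=l
--     return maxi
-- ===== SOURCE B (Python) =====
-- def findcons(l):
--     # run-length DP: up[i] = length of the consecutive run ending at i,
--     # down[i] = length of the consecutive run starting at i, so the maximal
--     # run containing i has length up[i] + down[i] - 1.
--     up = []
--     prev = None
--     for x in l:
--         up.append(up[-1] + 1 if prev is not None and prev + 1 == x else 1)
--         prev = x
--     down = []
--     prev = None
--     for x in reversed(l):
--         down.append(down[-1] + 1 if prev is not None and x + 1 == prev else 1)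
--         prev = x
--     down.reverse()
--     kept = [x for x, u, d in zip(l, up, down) if u + d - 1 >= 3]
--     if not kept:
--         return l
--     seen = set(kept)
--     out = list(kept)
--     for x in l:
--         if x not in seen:
--             seen.add(x)
--             out.append(x)
--     return out
-- ===== Notes on version B (the rewrite author's own statement) =====
-- stated objective: faster
-- what changed: A segments the list with a stateful current-run/finished-runs index loop, re-concatenates the qualifying runs, then appends leftovers with linear list membership; B never builds runs at all: it computes per-index run-length DP arrays up[i]/down[i] (run ending/starting at i), keeps exactly the elements with up[i]+down[i]-1 >= 3, and appends the remaining elements with a set-based seen check.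
import Mathlib
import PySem

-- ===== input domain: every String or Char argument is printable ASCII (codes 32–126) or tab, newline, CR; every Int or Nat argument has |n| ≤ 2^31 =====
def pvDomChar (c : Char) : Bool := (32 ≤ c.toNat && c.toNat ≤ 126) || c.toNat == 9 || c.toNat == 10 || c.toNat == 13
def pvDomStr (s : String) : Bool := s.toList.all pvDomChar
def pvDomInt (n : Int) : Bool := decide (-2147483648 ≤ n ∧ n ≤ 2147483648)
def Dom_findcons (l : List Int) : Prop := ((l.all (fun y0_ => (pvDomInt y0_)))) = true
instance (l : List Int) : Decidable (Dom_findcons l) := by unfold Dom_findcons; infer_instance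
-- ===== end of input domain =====

-- B replaces A's stateful run segmentation by a run-length DP (per-index run lengths up/down, arithmetic filter) and a set-based dedup instead of A's linear list membership; objective: faster (measured). Equal return values on nonempty lists.

-- ===== PORT A =====
-- literal transliteration of A: index loop building current run k and finished runs f,
-- then concatenation loop over f, then index loop appending unseen elements.
def findcons (l : List Int) : List Int :=
  let st : List Int × List (List Int) :=
    (List.range (l.length - 1)).foldl
      (fun st i =>
        if l.getD i 0 + 1 = l.getD (i+1) 0 then (st.1 ++ [l.getD (i+1) 0], st.2)
        else if st.1.length < 3 then ([l.getD (i+1) 0], st.2)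
        else if st.1.length ≠ 0 then ([l.getD (i+1) 0], st.2 ++ [st.1])
        else st)
      ([l.headD 0], [])
  let f := if 2 < st.1.length then st.2 ++ [st.1] else st.2
  if f.length ≠ 0 then
    let maxi := (List.range' 1 (f.length - 1)).foldl (fun m i => m ++ f.getD i []) (f.headD [])
    (List.range l.length).foldl (fun m j => if l.getD j 0 ∈ m then m else m ++ [l.getD j 0]) maxi
  else l

-- ===== PORT B =====
-- transliteration of Source B: forward scan up, backward scan down (run-length DP),
-- arithmetic filter u + d - 1 >= 3, then set-based dedup append.
def findcons_alt (l : List Int) : List Int :=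
  let up := (l.foldl
      (fun (st : List Int × Option Int) x =>
        (st.1 ++ [match st.2 with
          | some p => if p + 1 = x then st.1.getLast?.getD 0 + 1 else 1
          | none => 1], some x))
      ([], none)).1
  let down := ((l.reverse.foldl
      (fun (st : List Int × Option Int) x =>
        (st.1 ++ [match st.2 with
          | some p => if x + 1 = p then st.1.getLast?.getD 0 + 1 else 1
          | none => 1], some x))
      ([], none)).1).reverse
  let kept := ((l.zip (up.zip down)).filter (fun p => 3 ≤ p.2.1 + p.2.2 - 1)).map Prod.fst
  if kept.isEmpty then l
  else
    (l.foldl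
      (fun (st : PySem.Set Int × List Int) x =>
        if PySem.Set.contains st.1 x then st else (PySem.Set.add st.1 x, st.2 ++ [x]))
      (PySem.Set.ofList kept, kept)).2

-- ===== PRECONDITION & SPEC =====
-- Pre_ excludes only the empty list, on which A raises IndexError reading the first element.
def Pre_findcons (l : List Int) : Prop := l ≠ []
instance (l : List Int) : Decidable (Pre_findcons l) := by unfold Pre_findcons; infer_instance
def pvWitness_findcons : List Int := ([1, 2, 3, 7])

def Spec_findcons (l : List Int) (out : List Int) : Prop := out = findcons_alt l
instance (l : List Int) (out : List Int) : Decidable (Spec_findcons l out) := by unfold Spec_findcons; infer_instance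

-- ===== CLAIM (what is proved, stated in full; the proofs are below) =====
def Claim_equal_findcons : Prop := ∀ (l : List Int), Dom_findcons l → Pre_findcons l → Spec_findcons l (findcons l)

-- ===== LEMMAS AND PROOFS =====

-- A's pair step function (after the index loop is rephrased over adjacent pairs)
def stepA (st : List Int × List (List Int)) (pc : Int × Int) : List Int × List (List Int) :=
  if pc.1 + 1 = pc.2 then (st.1 ++ [pc.2], st.2)
  else if st.1.length < 3 then ([pc.2], st.2)
  else if st.1.length ≠ 0 then ([pc.2], st.2 ++ [st.1])
  else st

-- B's scan step functions
def stepUp (st : List Int × Option Int) (x : Int) : List Int × Option Int :=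
  (st.1 ++ [match st.2 with
    | some p => if p + 1 = x then st.1.getLast?.getD 0 + 1 else 1
    | none => 1], some x)

def stepDn (st : List Int × Option Int) (x : Int) : List Int × Option Int :=
  (st.1 ++ [match st.2 with
    | some p => if x + 1 = p then st.1.getLast?.getD 0 + 1 else 1
    | none => 1], some x)

def stepDedup (st : PySem.Set Int × List Int) (x : Int) : PySem.Set Int × List Int :=
  if PySem.Set.contains st.1 x then st else (PySem.Set.add st.1 x, st.2 ++ [x])

-- the maximal-run decomposition both sides are proved equal to
def runsOf : List Int → List (List Int)
  | [] => []
  | [a] => [[a]]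
  | a :: b :: t =>
    match runsOf (b :: t) with
    | [] => [[a]]
    | r :: rs => if a + 1 = b then (a :: r) :: rs else [a] :: r :: rs

def filter3 (R : List (List Int)) : List (List Int) := R.filter (fun r => 3 ≤ r.length)

def iotaSeg : Int → Nat → List Int
  | _, 0 => []
  | c, n + 1 => (c + 1) :: iotaSeg (c + 1) n

def riota : Nat → List Int
  | 0 => []
  | n + 1 => ((n : Int) + 1) :: riota n

def upFrom (c : Int) (p : Int) : List Int → List Int
  | [] => []
  | x :: t => if p + 1 = x then (c + 1) :: upFrom (c + 1) x t else 1 :: upFrom 1 x t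

theorem runsOf_cons (b : Int) (t : List Int) :
    ∃ tl rs, runsOf (b :: t) = (b :: tl) :: rs := by
  induction t generalizing b with
  | nil => exact ⟨[], [], rfl⟩
  | cons c t' ih =>
    obtain ⟨tl', rs', h⟩ := ih c
    by_cases hc : b + 1 = c
    · exact ⟨c :: tl', rs', by simp [runsOf, h, hc]⟩
    · exact ⟨[], (c :: tl') :: rs', by simp [runsOf, h, hc]⟩

theorem flatten_runsOf : ∀ l : List Int, (runsOf l).flatten = l := by
  intro l
  induction l with
  | nil => rfl
  | cons a t ih =>
    cases t with
    | nil => rfl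
    | cons b t' =>
      obtain ⟨tl, rs, h⟩ := runsOf_cons b t'
      rw [h] at ih
      by_cases hc : a + 1 = b
      · simp only [runsOf, h, hc, if_pos]
        simpa using ih
      · simp only [runsOf, h, hc, if_neg, not_false_iff]
        simpa using ih

theorem flatten_filter3_empty (R : List (List Int)) :
    (filter3 R).flatten = [] ↔ filter3 R = [] := by
  constructor
  · intro h
    cases hF : filter3 R with
    | nil => rfl
    | cons r t =>
      exfalso
      have hr : r ∈ filter3 R := hF ▸ List.mem_cons_self
      have h3 : 3 ≤ r.length := by
        have := (List.mem_filter.mp hr).2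
        simpa using this
      rw [hF] at h
      simp only [List.flatten_cons] at h
      have := List.append_eq_nil_iff.mp h
      simp [this.1] at h3
  · intro h; simp [h]

-- L1: A's index loop over range (len-1) with accesses l[i], l[i+1] is the fold over adjacent pairs
theorem foldl_range_pairs {σ : Type} (g : σ → Int → Int → σ) :
    ∀ (l : List Int) (init : σ),
      (List.range (l.length - 1)).foldl (fun st i => g st (l.getD i 0) (l.getD (i+1) 0)) init
        = (l.zip (l.drop 1)).foldl (fun st pc => g st pc.1 pc.2) init := by
  intro l
  induction l with
  | nil => intro init; simp
  | cons a t ih =>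
    cases t with
    | nil => intro init; simp
    | cons b t' =>
      intro init
      have h1 : (a :: b :: t').length - 1 = t'.length + 1 := by simp
      rw [h1, List.range_succ_eq_map]
      simp only [List.foldl_cons, List.foldl_map, List.getD_cons_zero, List.getD_cons_succ]
      have h2 := ih (g init a b)
      simp only [List.length_cons, Nat.add_sub_cancel, List.getD_cons_succ] at h2
      rw [h2]
      simp

-- A's finalization and the glued run decompositions
def finalizeA (st : List Int × List (List Int)) : List (List Int) :=
  if 2 < st.1.length then st.2 ++ [st.1] else st.2

def glue (k : List Int) : List (List Int) → List (List Int)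
  | (_ :: tl) :: rs => (k ++ tl) :: rs
  | _ => [k]

def upTail (c : Int) : List (List Int) → List Int
  | (_ :: tl) :: rs => iotaSeg c tl.length ++ (rs.map (fun r => iotaSeg 0 r.length)).flatten
  | _ => []

-- L2 (A-side): the stepA fold, finalized, computes filter3 of the glued run decomposition
theorem stepA_glue :
    ∀ (t : List Int) (a : Int) (k : List Int) (f : List (List Int)),
      finalizeA (((a :: t).zip t).foldl stepA (k ++ [a], f))
        = f ++ filter3 (glue (k ++ [a]) (runsOf (a :: t))) := by
  intro t
  induction t with
  | nil =>
    intro a k f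
    have hl : (k ++ [a]).length = k.length + 1 := by simp
    simp only [List.zip_nil_right, List.foldl_nil, runsOf, glue, List.append_nil]
    unfold finalizeA filter3
    by_cases h3 : 3 ≤ k.length + 1
    · rw [if_pos (show 2 < (k ++ [a]).length by omega),
        List.filter_cons_of_pos (by simp only [decide_eq_true_eq, hl]; omega), List.filter_nil]
    · rw [if_neg (show ¬ 2 < (k ++ [a]).length by omega),
        List.filter_cons_of_neg (by simp only [decide_eq_true_eq, hl]; omega), List.filter_nil]
      simp
  | cons b t' ih =>
    intro a k f
    obtain ⟨tl', rs', hbt⟩ := runsOf_cons b t'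
    have hl : (k ++ [a]).length = k.length + 1 := by simp
    simp only [List.zip_cons_cons, List.foldl_cons]
    by_cases hc : a + 1 = b
    · have hAB : stepA (k ++ [a], f) (a, b) = ((k ++ [a]) ++ [b], f) := by
        simp [stepA, hc]
      have h' : runsOf (a :: b :: t') = (a :: b :: tl') :: rs' := by
        simp [runsOf, hbt, hc]
      rw [hAB, h', ih b (k ++ [a]) f, hbt]
      simp [glue]
    · have h' : runsOf (a :: b :: t') = [a] :: (b :: tl') :: rs' := by
        simp [runsOf, hbt, hc]
      rw [h']
      by_cases h3 : (k ++ [a]).length < 3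
      · have h3' : k.length ≤ 1 := by omega
        have hAB : stepA (k ++ [a], f) (a, b) = ([] ++ [b], f) := by
          simp [stepA, hc, h3']
        rw [hAB, ih b [] f, hbt]
        simp only [glue, List.nil_append, List.append_nil]
        unfold filter3
        have hdrop : List.filter (fun r => decide (3 ≤ r.length)) ((k ++ [a]) :: (b :: tl') :: rs')
            = List.filter (fun r => decide (3 ≤ r.length)) ((b :: tl') :: rs') :=
          List.filter_cons_of_neg (by simp only [decide_eq_true_eq, hl]; omega)
        rw [hdrop]
        simp
      · have h3' : 2 ≤ k.length := by omega
        have hAB : stepA (k ++ [a], f) (a, b) = ([] ++ [b], f ++ [k ++ [a]]) := by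
          simp [stepA, hc, h3']
        rw [hAB, ih b [] (f ++ [k ++ [a]]), hbt]
        simp only [glue, List.nil_append, List.append_nil]
        unfold filter3
        have hkeep : List.filter (fun r => decide (3 ≤ r.length)) ((k ++ [a]) :: (b :: tl') :: rs')
            = (k ++ [a]) :: List.filter (fun r => decide (3 ≤ r.length)) ((b :: tl') :: rs') :=
          List.filter_cons_of_pos (by simp only [decide_eq_true_eq, hl]; omega)
        rw [hkeep]
        simp

-- L3: A's concatenation loop over f computes f.flatten
theorem foldl_concat_flatten :
    ∀ (rest : List (List Int)) (acc : List Int),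
      (List.range rest.length).foldl (fun m i => m ++ rest.getD i []) acc = acc ++ rest.flatten := by
  intro rest
  induction rest with
  | nil => intro acc; simp
  | cons r rest' ih =>
    intro acc
    rw [List.length_cons, List.range_succ_eq_map]
    simp only [List.foldl_cons, List.foldl_map, List.getD_cons_zero, List.getD_cons_succ]
    rw [ih (acc ++ r)]
    simp

-- L4: an index loop over range (len l) with access l[j] is a fold over l
theorem foldl_range_getD {σ : Type} (g : σ → Int → σ) :
    ∀ (l : List Int) (init : σ),
      (List.range l.length).foldl (fun m j => g m (l.getD j 0)) init = l.foldl g init := by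
  intro l
  induction l with
  | nil => intro init; simp
  | cons a t ih =>
    intro init
    rw [List.length_cons, List.range_succ_eq_map]
    simp only [List.foldl_cons, List.foldl_map, List.getD_cons_zero, List.getD_cons_succ]
    exact ih (g init a)

-- B-side: the forward scan computes upFrom
theorem stepUp_fold :
    ∀ (t : List Int) (acc : List Int) (p c : Int), acc.getLast?.getD 0 = c →
      (t.foldl stepUp (acc, some p)).1 = acc ++ upFrom c p t := by
  intro t
  induction t with
  | nil => intro acc p c _; simp [upFrom]
  | cons x t' ih =>
    intro acc p c hlast
    by_cases hc : p + 1 = x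
    · have hs : stepUp (acc, some p) x = (acc ++ [c + 1], some x) := by
        simp [stepUp, hc, hlast]
      rw [List.foldl_cons, hs, ih (acc ++ [c + 1]) x (c + 1) (by simp)]
      simp [upFrom, hc]
    · have hs : stepUp (acc, some p) x = (acc ++ [1], some x) := by
        simp [stepUp, hc]
      rw [List.foldl_cons, hs, ih (acc ++ [1]) x 1 (by simp)]
      simp [upFrom, hc]

-- B-side: upFrom follows the run decomposition
theorem upFrom_runs :
    ∀ (t : List Int) (a c : Int), upFrom c a t = upTail c (runsOf (a :: t)) := by
  intro t
  induction t with
  | nil => intro a c; simp [upFrom, runsOf, upTail, iotaSeg]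
  | cons b t' ih =>
    intro a c
    obtain ⟨tl', rs', hbt⟩ := runsOf_cons b t'
    by_cases hc : a + 1 = b
    · have h' : runsOf (a :: b :: t') = (a :: b :: tl') :: rs' := by
        simp [runsOf, hbt, hc]
      rw [h']
      simp only [upFrom, hc, if_pos]
      rw [ih b (c + 1), hbt]
      simp [upTail, iotaSeg]
    · have h' : runsOf (a :: b :: t') = [a] :: (b :: tl') :: rs' := by
        simp [runsOf, hbt, hc]
      rw [h']
      simp only [upFrom, hc, if_neg, not_false_iff]
      rw [ih b 1, hbt]
      simp [upTail, iotaSeg]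

-- B-side: the whole forward scan computes the per-run iotaSeg flatten
theorem up_full :
    ∀ l : List Int,
      (l.foldl stepUp (([] : List Int), (none : Option Int))).1
        = ((runsOf l).map (fun r => iotaSeg 0 r.length)).flatten := by
  intro l
  cases l with
  | nil => simp [runsOf]
  | cons x rest =>
    have h0 : stepUp ([], none) x = ([1], some x) := by simp [stepUp]
    rw [List.foldl_cons, h0, stepUp_fold rest [1] x 1 (by simp)]
    rw [upFrom_runs rest x 1]
    obtain ⟨tl, rs, h⟩ := runsOf_cons x rest
    rw [h]
    simp [upTail, iotaSeg]

-- B-side: the backward scan's accumulator is the reversed per-run riota flatten, its prev is head?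
theorem stepDn_fold :
    ∀ l : List Int,
      (l.reverse.foldl stepDn ([], none)).1
          = (((runsOf l).map (fun r => riota r.length)).flatten).reverse
        ∧ (l.reverse.foldl stepDn ([], none)).2 = l.head? := by
  intro l
  induction l with
  | nil => simp [runsOf]
  | cons a t ih =>
    rw [List.reverse_cons, List.foldl_append]
    obtain ⟨ih1, ih2⟩ := ih
    cases t with
    | nil =>
      simp only [List.reverse_nil, List.foldl_nil] at *
      constructor
      · simp [stepDn, runsOf, riota]
      · simp [stepDn]
    | cons b t' =>
      obtain ⟨tl', rs', hbt⟩ := runsOf_cons b t'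
      have hne : (((runsOf (b :: t')).map (fun r => riota r.length)).flatten)
          = ((tl'.length : Int) + 1) ::
            (riota tl'.length ++ (rs'.map (fun r => riota r.length)).flatten) := by
        simp [hbt, riota]
      have hlast : ((l₂ : List Int) → l₂ = (((runsOf (b :: t')).map (fun r => riota r.length)).flatten).reverse → l₂.getLast?.getD 0 = ((tl'.length : Int) + 1)) := by
        intro l₂ hl₂
        rw [hl₂, hne]
        simp
      have hprev : (List.foldl stepDn ([], none) (b :: t').reverse).2 = some b := by
        simpa using ih2
      by_cases hc : a + 1 = b
      · have hstep : stepDn (List.foldl stepDn ([], none) (b :: t').reverse) a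
            = ((List.foldl stepDn ([], none) (b :: t').reverse).1 ++ [(tl'.length : Int) + 1 + 1], some a) := by
          simp only [stepDn, hprev, hc, if_pos]
          rw [hlast _ ih1]
        rw [List.foldl_cons, List.foldl_nil] at *
        constructor
        · rw [hstep]
          simp only [ih1]
          have hr : runsOf (a :: b :: t') = (a :: b :: tl') :: rs' := by
            simp [runsOf, hbt, hc]
          rw [hr, hne]
          simp [riota]
        · rfl
      · have hstep : stepDn (List.foldl stepDn ([], none) (b :: t').reverse) a
            = ((List.foldl stepDn ([], none) (b :: t').reverse).1 ++ [1], some a) := by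
          simp [stepDn, hc]
        rw [List.foldl_cons, List.foldl_nil] at *
        constructor
        · rw [hstep]
          simp only [ih1]
          have hr : runsOf (a :: b :: t') = [a] :: (b :: tl') :: rs' := by
            simp [runsOf, hbt, hc]
          rw [hr, hne]
          simp [riota]
        · rfl

-- B-side: per-run filter is all-or-nothing
theorem perRun_filter :
    ∀ (r : List Int) (c : Int),
      ((r.zip ((iotaSeg c r.length).zip (riota r.length))).filter
          (fun p => decide (3 ≤ p.2.1 + p.2.2 - 1))).map Prod.fst
        = if 3 ≤ c + (r.length : Int) then r else [] := by
  intro r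
  induction r with
  | nil => intro c; simp
  | cons x r' ih =>
    intro c
    simp only [List.length_cons, iotaSeg, riota, List.zip_cons_cons, List.filter_cons]
    by_cases hb : (3:Int) ≤ c + 1 + ((r'.length : Int) + 1) - 1
    · rw [if_pos (by simpa using hb)]
      simp only [List.map_cons, ih (c + 1)]
      rw [if_pos (by omega), if_pos (by push_cast; omega)]
    · rw [if_neg (by simpa using hb)]
      rw [ih (c + 1), if_neg (by omega), if_neg (by push_cast; omega)]

theorem length_iotaSeg : ∀ (n : Nat) (c : Int), (iotaSeg c n).length = n := by
  intro n
  induction n with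
  | zero => intro c; rfl
  | succ m ih => intro c; simp [iotaSeg, ih]

theorem length_riota : ∀ n : Nat, (riota n).length = n := by
  intro n
  induction n with
  | zero => rfl
  | succ m ih => simp [riota, ih]

-- B-side: the zip/filter over flattened runs keeps exactly the runs of length ≥ 3
theorem kept_flatten :
    ∀ R : List (List Int),
      (((R.flatten).zip
          (((R.map (fun r => iotaSeg 0 r.length)).flatten).zip
            ((R.map (fun r => riota r.length)).flatten))).filter
          (fun p => decide (3 ≤ p.2.1 + p.2.2 - 1))).map Prod.fst
        = (filter3 R).flatten := by
  intro R
  induction R with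
  | nil => simp [filter3]
  | cons r R' ih =>
    simp only [List.flatten_cons, List.map_cons]
    have hz1 : ((iotaSeg 0 r.length ++ (R'.map (fun r => iotaSeg 0 r.length)).flatten).zip
          (riota r.length ++ (R'.map (fun r => riota r.length)).flatten))
        = (iotaSeg 0 r.length).zip (riota r.length)
          ++ ((R'.map (fun r => iotaSeg 0 r.length)).flatten).zip
              ((R'.map (fun r => riota r.length)).flatten) := by
      apply List.zip_append
      rw [length_iotaSeg, length_riota]
    rw [hz1]
    have hz2 : (r ++ R'.flatten).zip
          ((iotaSeg 0 r.length).zip (riota r.length)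
            ++ ((R'.map (fun r => iotaSeg 0 r.length)).flatten).zip
                ((R'.map (fun r => riota r.length)).flatten))
        = r.zip ((iotaSeg 0 r.length).zip (riota r.length))
          ++ (R'.flatten).zip
              (((R'.map (fun r => iotaSeg 0 r.length)).flatten).zip
                ((R'.map (fun r => riota r.length)).flatten)) := by
      apply List.zip_append
      rw [List.length_zip, length_iotaSeg, length_riota]
      simp
    rw [hz2, List.filter_append, List.map_append, ih, perRun_filter r 0]
    simp only [zero_add]
    by_cases h3 : 3 ≤ r.length
    · have : (3 : Int) ≤ (r.length : Int) := by exact_mod_cast h3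
      rw [if_pos this]
      simp [filter3, h3]
    · have : ¬ ((3 : Int) ≤ (r.length : Int)) := by exact_mod_cast h3
      rw [if_neg this]
      simp [filter3, h3]

-- B-side: the set-based dedup loop equals A's list-membership dedup loop
theorem dedup_set_list :
    ∀ (l : List Int) (seen : PySem.Set Int) (out : List Int),
      (∀ y : Int, y ∈ seen ↔ y ∈ out) →
      (l.foldl stepDedup (seen, out)).2
        = l.foldl (fun m x => if x ∈ m then m else m ++ [x]) out := by
  intro l
  induction l with
  | nil => intro seen out _; rfl
  | cons x t ih =>
    intro seen out hinv
    simp only [List.foldl_cons]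
    by_cases hx : x ∈ out
    · have hm : x ∈ seen := (hinv x).mpr hx
      have hs : stepDedup (seen, out) x = (seen, out) := by simp [stepDedup, hm]
      rw [hs, if_pos hx]
      exact ih seen out hinv
    · have hm : x ∉ seen := fun h => hx ((hinv x).mp h)
      have hs : stepDedup (seen, out) x = (PySem.Set.add seen x, out ++ [x]) := by
        simp [stepDedup, hm]
      rw [hs, if_neg hx]
      apply ih
      intro y
      rw [PySem.Set.mem_add, hinv y, List.mem_append, List.mem_singleton]

-- ===== VERDICT (by name: the statement is the Claim_ definition above) =====
theorem findcons_spec : Claim_equal_findcons := by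
  intro l hdom hpre
  unfold Spec_findcons
  obtain ⟨x, rest, rfl⟩ := List.exists_cons_of_ne_nil hpre
  obtain ⟨tl, rs, hruns⟩ := runsOf_cons x rest
  simp only [findcons, findcons_alt, List.headD_cons]
  -- A's index loop is the fold of stepA over adjacent pairs
  have hA1 : List.foldl
        (fun (st : List Int × List (List Int)) i =>
          if (x :: rest).getD i 0 + 1 = (x :: rest).getD (i + 1) 0 then
            (st.1 ++ [(x :: rest).getD (i + 1) 0], st.2)
          else
            if st.1.length < 3 then ([(x :: rest).getD (i + 1) 0], st.2)
            else if st.1.length ≠ 0 then ([(x :: rest).getD (i + 1) 0], st.2 ++ [st.1]) else st)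
        ([x], []) (List.range ((x :: rest).length - 1))
      = List.foldl stepA ([x], []) ((x :: rest).zip rest) :=
    foldl_range_pairs
      (fun (st : List Int × List (List Int)) a b =>
        if a + 1 = b then (st.1 ++ [b], st.2)
        else if st.1.length < 3 then ([b], st.2)
        else if st.1.length ≠ 0 then ([b], st.2 ++ [st.1]) else st)
      (x :: rest) ([x], [])
  rw [hA1]
  -- A's finished-run list f is filter3 of the run decomposition
  have hF : (if 2 < (List.foldl stepA ([x], []) ((x :: rest).zip rest)).1.length then
        (List.foldl stepA ([x], []) ((x :: rest).zip rest)).2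
          ++ [(List.foldl stepA ([x], []) ((x :: rest).zip rest)).1]
      else (List.foldl stepA ([x], []) ((x :: rest).zip rest)).2)
      = filter3 (runsOf (x :: rest)) := by
    have hg := stepA_glue rest x [] []
    simp only [List.nil_append] at hg
    rw [hruns] at hg ⊢
    simpa [finalizeA, glue] using hg
  rw [hF]
  -- B's up scan
  have hB1 : ((x :: rest).foldl
      (fun (st : List Int × Option Int) y =>
        (st.1 ++ [match st.2 with
          | some p => if p + 1 = y then st.1.getLast?.getD 0 + 1 else 1
          | none => 1], some y))
      ([], none)).1
      = ((runsOf (x :: rest)).map (fun r => iotaSeg 0 r.length)).flatten := up_full (x :: rest)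
  rw [hB1]
  -- B's down scan
  have hB2 : ((((x :: rest).reverse.foldl
      (fun (st : List Int × Option Int) y =>
        (st.1 ++ [match st.2 with
          | some p => if y + 1 = p then st.1.getLast?.getD 0 + 1 else 1
          | none => 1], some y))
      ([], none)).1).reverse)
      = ((runsOf (x :: rest)).map (fun r => riota r.length)).flatten := by
    have := (stepDn_fold (x :: rest)).1
    rw [show (fun (st : List Int × Option Int) y =>
        (st.1 ++ [match st.2 with
          | some p => if y + 1 = p then st.1.getLast?.getD 0 + 1 else 1
          | none => 1], some y)) = stepDn from rfl, this]
    simp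
  rw [hB2]
  -- B's kept list is the flatten of the qualifying runs
  have hB3 : (((x :: rest).zip
        ((((runsOf (x :: rest)).map (fun r => iotaSeg 0 r.length)).flatten).zip
          (((runsOf (x :: rest)).map (fun r => riota r.length)).flatten))).filter
        (fun p => decide (3 ≤ p.2.1 + p.2.2 - 1))).map Prod.fst
      = (filter3 (runsOf (x :: rest))).flatten := by
    have := kept_flatten (runsOf (x :: rest))
    rwa [flatten_runsOf (x :: rest)] at this
  rw [hB3]
  by_cases hnil : filter3 (runsOf (x :: rest)) = []
  · simp [hnil]
  · have hflat : (filter3 (runsOf (x :: rest))).flatten ≠ [] :=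
      fun h => hnil ((flatten_filter3_empty _).mp h)
    rw [if_pos (fun h => hnil (List.length_eq_zero_iff.mp h)),
      if_neg (by simpa [List.isEmpty_iff] using hflat)]
    -- A's concatenation loop computes the flatten
    obtain ⟨m0, Ft, hFt⟩ := List.exists_cons_of_ne_nil hnil
    have hmaxi : (List.range' 1 ((filter3 (runsOf (x :: rest))).length - 1)).foldl
        (fun m i => m ++ (filter3 (runsOf (x :: rest))).getD i [])
        ((filter3 (runsOf (x :: rest))).headD [])
        = (filter3 (runsOf (x :: rest))).flatten := by
      rw [hFt]
      simp only [List.headD_cons, List.length_cons, Nat.add_sub_cancel,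
        List.range'_eq_map_range, List.foldl_map]
      have hsh : ∀ (m : List Int) (i : Nat),
          m ++ (m0 :: Ft).getD (1 + i) [] = m ++ Ft.getD i [] := by
        intro m i; rw [Nat.add_comm, List.getD_cons_succ]
      simp only [hsh]
      rw [foldl_concat_flatten Ft m0]
      simp
    rw [hmaxi]
    -- A's append loop = B's set-based dedup loop
    rw [foldl_range_getD (fun m v => if v ∈ m then m else m ++ [v]) (x :: rest)]
    rw [show (fun (st : PySem.Set Int × List Int) y =>
        if PySem.Set.contains st.1 y then st else (PySem.Set.add st.1 y, st.2 ++ [y]))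
        = stepDedup from rfl]
    rw [dedup_set_list (x :: rest) (PySem.Set.ofList ((filter3 (runsOf (x :: rest))).flatten))
      ((filter3 (runsOf (x :: rest))).flatten)
      (fun y => PySem.Set.mem_ofList _ y)]
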